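-- pv_equiv track=rewrite | github.com/KikoNet13/SpiritPlanner | app/utils/router.py | resolve_route_target
-- ===== SOURCE A (Python) =====
-- RouteParams = dict[str, str]
--
-- def normalize_route(route: str | None) -> str:
--     if not route:
--         return "/eras"
--     normalized = route.strip()
--     if not normalized.startswith("/"):
--         normalized = f"/{normalized}"
--     if normalized.endswith("/") and normalized != "/":
--         normalized = normalized.rstrip("/")
--     if not normalized or normalized == "/":
--         return "/eras"
--     return normalized
--
-- def resolve_route_target(route: str) -> tuple[str, RouteParams]:
--     normalized = normalize_route(route)
--     parts = [part for part in normalized.split("/") if part]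
--     if not parts or parts[0] != "eras":
--         return "/eras", {}
--     if len(parts) == 1:
--         return "/eras", {}
--     if len(parts) == 2:
--         return "/eras/{era_id}", {"era_id": parts[1]}
--     if len(parts) >= 4 and parts[2] == "periods":
--         if len(parts) == 4:
--             return "/eras/{era_id}/periods/{period_id}", {
--                 "era_id": parts[1],
--                 "period_id": parts[3],
--             }
--         if len(parts) == 6 and parts[4] == "incursions":
--             return "/eras/{era_id}/periods/{period_id}/incursions/{incursion_id}", {
--                 "era_id": parts[1],
--                 "period_id": parts[3],
--                 "incursion_id": parts[5],
--             }
--     return "/eras", {}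
-- ===== SOURCE B (Python) =====
-- RouteParams = dict[str, str]
--
-- def normalize_route(route):
--     if not route:
--         return "/eras"
--     normalized = route.strip()
--     if not normalized.startswith("/"):
--         normalized = f"/{normalized}"
--     if normalized.endswith("/") and normalized != "/":
--         normalized = normalized.rstrip("/")
--     if not normalized or normalized == "/":
--         return "/eras"
--     return normalized
--
-- _ROUTES = [
--     (["eras"], "/eras"),
--     (["eras", "{era_id}"], "/eras/{era_id}"),
--     (["eras", "{era_id}", "periods", "{period_id}"], "/eras/{era_id}/periods/{period_id}"),
--     (["eras", "{era_id}", "periods", "{period_id}", "incursions", "{incursion_id}"],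
--      "/eras/{era_id}/periods/{period_id}/incursions/{incursion_id}"),
-- ]
--
-- def resolve_route_target(route):
--     parts = [part for part in normalize_route(route).split("/") if part]
--     for segs, template in _ROUTES:
--         if len(segs) == len(parts) and all(
--             seg == part
--             for seg, part in zip(segs, parts)
--             if not seg.startswith("{")
--         ):
--             return template, {
--                 seg[1:-1]: part
--                 for seg, part in zip(segs, parts)
--                 if seg.startswith("{")
--             }
--     return "/eras", {}
-- ===== Notes on version B (the rewrite author's own statement) =====
-- stated objective: idiomatic
-- what changed: Replaced A's hand-written if-chain over route shapes (with explicit length tests and indexed part accesses) by a data-driven first-match loop over an ordered table of segment patterns whose placeholder segments are collected into the params dict; normalize_route is kept unchanged.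
import Mathlib
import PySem

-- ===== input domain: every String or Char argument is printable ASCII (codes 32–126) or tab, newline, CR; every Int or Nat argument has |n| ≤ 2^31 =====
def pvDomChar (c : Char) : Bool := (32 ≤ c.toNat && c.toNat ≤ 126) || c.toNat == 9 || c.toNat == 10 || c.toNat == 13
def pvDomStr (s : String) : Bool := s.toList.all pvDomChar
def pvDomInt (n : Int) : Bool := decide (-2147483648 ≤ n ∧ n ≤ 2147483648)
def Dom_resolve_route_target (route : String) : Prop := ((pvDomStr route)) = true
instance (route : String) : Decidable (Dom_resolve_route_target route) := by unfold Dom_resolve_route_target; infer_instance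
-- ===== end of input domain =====

-- B replaces A's hard-coded if-chain over route shapes by a uniform first-match loop over an
-- ordered table of segment patterns (idiomatic, data-driven); normalize_route is kept unchanged,
-- shared by both ports exactly as both Python files share it.

-- ===== PORT A =====
-- exact hand port of str.rstrip("/") (drop trailing '/' characters); PySem has no rstrip-with-chars
def pvRstripSlash (cs : List Char) : List Char := (cs.reverse.dropWhile (fun c => c == '/')).reverse

def normalize_route (route : String) : String :=
  if route == "" then "/eras" else
  let n1 := PySem.Str.strip route
  let n2 := if !(PySem.Str.startswith n1 "/") then String.ofList ('/' :: n1.toList) else n1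
  let n3 := if PySem.Str.endswith n2 "/" && !(n2 == "/") then String.ofList (pvRstripSlash n2.toList) else n2
  if n3 == "" || n3 == "/" then "/eras" else n3

-- parts[i] only occurs under a length guard, so pyGet? is always `some` there and getD "" is never used;
-- split? is always `some` since the separator "/" is nonempty
def resolve_route_target (route : String) : String × (List (String × String)) :=
  let normalized := normalize_route route
  let parts := ((PySem.Str.split? normalized "/").getD []).filter (fun part => !(part == ""))
  if parts = [] || !((PySem.List.pyGet? parts 0).getD "" == "eras") then ("/eras", [])
  else if parts.length = 1 then ("/eras", [])
  else if parts.length = 2 then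
    ("/eras/{era_id}", [("era_id", (PySem.List.pyGet? parts 1).getD "")])
  else if 4 ≤ parts.length && (PySem.List.pyGet? parts 2).getD "" == "periods" then
    if parts.length = 4 then
      ("/eras/{era_id}/periods/{period_id}",
        [("era_id", (PySem.List.pyGet? parts 1).getD ""),
         ("period_id", (PySem.List.pyGet? parts 3).getD "")])
    else if parts.length = 6 && (PySem.List.pyGet? parts 4).getD "" == "incursions" then
      ("/eras/{era_id}/periods/{period_id}/incursions/{incursion_id}",
        [("era_id", (PySem.List.pyGet? parts 1).getD ""),
         ("period_id", (PySem.List.pyGet? parts 3).getD ""),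
         ("incursion_id", (PySem.List.pyGet? parts 5).getD "")])
    else ("/eras", [])
  else ("/eras", [])

-- ===== PORT B =====
-- the ordered route table: segments are literals or '{name}' placeholders
def pvRoutes : List (List String × String) :=
  [ (["eras"], "/eras"),
    (["eras", "{era_id}"], "/eras/{era_id}"),
    (["eras", "{era_id}", "periods", "{period_id}"], "/eras/{era_id}/periods/{period_id}"),
    (["eras", "{era_id}", "periods", "{period_id}", "incursions", "{incursion_id}"],
      "/eras/{era_id}/periods/{period_id}/incursions/{incursion_id}") ]

-- first-match loop: length must agree, every literal segment must equal its part;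
-- on a match the placeholder segments (seg[1:-1]) are paired with their parts
def pvMatchLoop (table : List (List String × String)) (parts : List String) :
    String × (List (String × String)) :=
  match table with
  | [] => ("/eras", [])
  | (segs, template) :: rest =>
    if segs.length == parts.length &&
       ((segs.zip parts).filter (fun sp => !(PySem.Str.startswith sp.1 "{"))).all
         (fun sp => sp.1 == sp.2) then
      (template,
        ((segs.zip parts).filter (fun sp => PySem.Str.startswith sp.1 "{")).map
          (fun sp => (PySem.Str.slice sp.1 (some 1) (some (-1)), sp.2)))
    else pvMatchLoop rest parts

def resolve_route_target_alt (route : String) : String × (List (String × String)) :=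
  let parts := ((PySem.Str.split? (normalize_route route) "/").getD []).filter
    (fun part => !(part == ""))
  pvMatchLoop pvRoutes parts

-- ===== PRECONDITION & SPEC =====
def Spec_resolve_route_target (route : String) (out : String × (List (String × String))) : Prop := out = resolve_route_target_alt route
instance (route : String) (out : String × (List (String × String))) : Decidable (Spec_resolve_route_target route out) := by unfold Spec_resolve_route_target; infer_instance

-- ===== CLAIM (what is proved, stated in full; the proofs are below) =====
def Claim_equal_resolve_route_target : Prop := ∀ (route : String), Dom_resolve_route_target route → Spec_resolve_route_target route (resolve_route_target route)

-- ===== LEMMAS AND PROOFS =====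

-- closed facts about the table's literal segments
theorem pv_sw_eras : PySem.Chars.startswith ['e','r','a','s'] ['{'] = false := by decide
theorem pv_sw_periods : PySem.Chars.startswith ['p','e','r','i','o','d','s'] ['{'] = false := by decide
theorem pv_sw_inc : PySem.Chars.startswith ['i','n','c','u','r','s','i','o','n','s'] ['{'] = false := by decide
theorem pv_sw_era_id : PySem.Chars.startswith ['{','e','r','a','_','i','d','}'] ['{'] = true := by decide
theorem pv_sw_period_id : PySem.Chars.startswith ['{','p','e','r','i','o','d','_','i','d','}'] ['{'] = true := by decide
theorem pv_sw_inc_id : PySem.Chars.startswith ['{','i','n','c','u','r','s','i','o','n','_','i','d','}'] ['{'] = true := by decide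
theorem pv_sl_era : PySem.Str.slice "{era_id}" (some 1) (some (-1)) = "era_id" := by decide
theorem pv_sl_period : PySem.Str.slice "{period_id}" (some 1) (some (-1)) = "period_id" := by decide
theorem pv_sl_inc : PySem.Str.slice "{incursion_id}" (some 1) (some (-1)) = "incursion_id" := by decide

-- A's if-chain dispatch equals B's table loop on EVERY parts list
theorem pvDispatch_eq (parts : List String) :
    (if parts = [] || !((PySem.List.pyGet? parts 0).getD "" == "eras") then (("/eras", []) : String × (List (String × String)))
     else if parts.length = 1 then ("/eras", [])
     else if parts.length = 2 then
       ("/eras/{era_id}", [("era_id", (PySem.List.pyGet? parts 1).getD "")])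
     else if 4 ≤ parts.length && (PySem.List.pyGet? parts 2).getD "" == "periods" then
       if parts.length = 4 then
         ("/eras/{era_id}/periods/{period_id}",
           [("era_id", (PySem.List.pyGet? parts 1).getD ""),
            ("period_id", (PySem.List.pyGet? parts 3).getD "")])
       else if parts.length = 6 && (PySem.List.pyGet? parts 4).getD "" == "incursions" then
         ("/eras/{era_id}/periods/{period_id}/incursions/{incursion_id}",
           [("era_id", (PySem.List.pyGet? parts 1).getD ""),
            ("period_id", (PySem.List.pyGet? parts 3).getD ""),
            ("incursion_id", (PySem.List.pyGet? parts 5).getD "")])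
       else ("/eras", [])
     else ("/eras", []))
    = pvMatchLoop pvRoutes parts := by
  rcases parts with _ | ⟨a, _ | ⟨b, _ | ⟨c, _ | ⟨d, _ | ⟨e, _ | ⟨f, _ | ⟨g, rest⟩⟩⟩⟩⟩⟩⟩
  · decide
  · by_cases ha : a = "eras" <;>
      simp [pvMatchLoop, pvRoutes, pv_sw_eras, ha,
        PySem.List.pyGet?, PySem.List.pyIdx?]
  · by_cases ha : a = "eras" <;>
      simp [pvMatchLoop, pvRoutes, pv_sw_eras, pv_sw_era_id, pv_sl_era, ha,
        PySem.List.pyGet?, PySem.List.pyIdx?] <;> (try tauto)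
  · by_cases ha : a = "eras" <;>
      simp [pvMatchLoop, pvRoutes, pv_sw_eras, pv_sw_era_id, ha,
        PySem.List.pyGet?, PySem.List.pyIdx?]
  · by_cases ha : a = "eras" <;> by_cases hc : c = "periods" <;>
      simp [pvMatchLoop, pvRoutes, pv_sw_eras, pv_sw_era_id, pv_sw_periods, pv_sw_period_id,
        pv_sl_era, pv_sl_period, ha, hc,
        PySem.List.pyGet?, PySem.List.pyIdx?] <;> (try tauto)
  · by_cases ha : a = "eras" <;> by_cases hc : c = "periods" <;>
      simp [pvMatchLoop, pvRoutes, pv_sw_eras, pv_sw_era_id, pv_sw_periods, pv_sw_period_id, ha, hc,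
        PySem.List.pyGet?, PySem.List.pyIdx?]
  · by_cases ha : a = "eras" <;> by_cases hc : c = "periods" <;> by_cases he : e = "incursions" <;>
      simp [pvMatchLoop, pvRoutes, pv_sw_eras, pv_sw_era_id, pv_sw_periods, pv_sw_period_id,
        pv_sw_inc, pv_sw_inc_id, pv_sl_era, pv_sl_period, pv_sl_inc, ha, hc, he,
        PySem.List.pyGet?, PySem.List.pyIdx?] <;> (try tauto)
  · simp [pvMatchLoop, pvRoutes, PySem.List.pyGet?, PySem.List.pyIdx?]

-- ===== VERDICT (by name: the statement is the Claim_ definition above) =====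
theorem resolve_route_target_spec : Claim_equal_resolve_route_target := by
  intro route _
  show _ = _
  unfold resolve_route_target resolve_route_target_alt
  exact pvDispatch_eq _
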